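-- pv_equiv track=rewrite | github.com/lubelak/AirspanPythonScripts | clearSubscriber/clearSubscriber.py | userDictParser
-- ===== SOURCE A (Python) =====
-- import collections
--
-- def userDictParser(user_dict):
--     # parsowanie słownika info o użytkowniku
--     ip_dict = {}
--     apn_dict = {}
--     for key in user_dict:
--         if 'ip' in key:
--             ip_dict[key] = user_dict[key]
--         elif 'apn' in key:
--             apn_dict[key] = user_dict[key]
--             # postortowanie słownika od apn1 do apn3
--     ordered_ip_dict = collections.OrderedDict(sorted(ip_dict.items()))
--     ordered_apn_dict = collections.OrderedDict(sorted(apn_dict.items()))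
--     return ordered_apn_dict, ordered_ip_dict
-- ===== SOURCE B (Python) =====
-- import collections
--
-- def _insort(items, item):
--     # hand-rolled sorted insertion (linear scan, tuple comparison)
--     i = 0
--     while i < len(items) and items[i] < item:
--         i += 1
--     items.insert(i, item)
--
-- def userDictParser(user_dict):
--     # insertion sort by hand: keep the two (key, value) lists in sorted order
--     # while scanning the dict once; no call to sorted() at all
--     ip_items = []
--     apn_items = []
--     for key, value in user_dict.items():
--         if 'ip' in key:
--             _insort(ip_items, (key, value))
--         elif 'apn' in key:
--             _insort(apn_items, (key, value))
--     return collections.OrderedDict(apn_items), collections.OrderedDict(ip_items)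
-- ===== Notes on version B (the rewrite author's own statement) =====
-- stated objective: alternative
-- what changed: B drops sorted() altogether: it maintains the two pair lists in sorted order via a hand-written sorted-insertion helper during one scan of the dict (insertion sort), then wraps the already-sorted lists in OrderedDicts; A partitions into plain dicts and then timsorts each one.
import Mathlib
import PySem

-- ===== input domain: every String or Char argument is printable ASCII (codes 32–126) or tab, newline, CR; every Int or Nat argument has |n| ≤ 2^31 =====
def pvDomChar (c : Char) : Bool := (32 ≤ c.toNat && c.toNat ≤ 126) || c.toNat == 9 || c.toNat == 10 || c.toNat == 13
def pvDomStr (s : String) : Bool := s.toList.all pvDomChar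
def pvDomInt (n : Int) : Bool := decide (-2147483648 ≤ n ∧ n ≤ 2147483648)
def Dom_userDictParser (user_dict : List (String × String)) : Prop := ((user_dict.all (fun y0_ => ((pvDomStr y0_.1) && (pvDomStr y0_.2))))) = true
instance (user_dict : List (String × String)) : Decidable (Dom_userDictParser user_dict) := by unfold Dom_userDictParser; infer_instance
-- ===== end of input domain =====

-- B replaces the sorted() calls entirely: it maintains the two pair lists in sorted order by
-- hand-written sorted insertion during a single scan (insertion sort, O(n^2) worst case vs A's
-- O(n log n)); same return value, different algorithm, no speed claim.


-- ===== PORT A =====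
-- 'for key in user_dict' iterates the dict's keys in insertion order; 'user_dict[key]' is a dict
-- lookup, ported as getD on the dict (the key is always present).  Python's sorted(d.items())
-- compares (key, value) tuples; under Pre_ (distinct keys, as in any Python dict) the key alone
-- decides every comparison, so sorting by the key is exact.
def userDictParser (user_dict : List (String × String)) : (List (String × String)) × (List (String × String)) :=
  let st := user_dict.foldl
    (fun (st : PySem.Dict String String × PySem.Dict String String) kv =>
      if PySem.Str.isIn "ip" kv.1 then
        (st.1.insert kv.1 ((PySem.Dict.mk user_dict).getD kv.1 ""), st.2)
      else if PySem.Str.isIn "apn" kv.1 then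
        (st.1, st.2.insert kv.1 ((PySem.Dict.mk user_dict).getD kv.1 ""))
      else st)
    (PySem.Dict.empty, PySem.Dict.empty)
  (PySem.List.sorted st.2.items (fun p => p.1) false,
   PySem.List.sorted st.1.items (fun p => p.1) false)

-- ===== PORT B =====
-- _insort scans for the first position whose element is not < item (Python tuple '<' is
-- lexicographic: first components, then second on equal firsts) and inserts there; the main
-- loop threads the two sorted lists as the fold state; OrderedDict(pairs) is Dict.ofList.
def pvInsort (item : String × String) : List (String × String) → List (String × String)
  | [] => [item]
  | h :: t =>
    if h.1 < item.1 ∨ (h.1 = item.1 ∧ h.2 < item.2) then h :: pvInsort item t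
    else item :: h :: t

def userDictParser_alt (user_dict : List (String × String)) : (List (String × String)) × (List (String × String)) :=
  let st := user_dict.foldl
    (fun (st : List (String × String) × List (String × String)) kv =>
      if PySem.Str.isIn "ip" kv.1 then (pvInsort kv st.1, st.2)
      else if PySem.Str.isIn "apn" kv.1 then (st.1, pvInsort kv st.2)
      else st)
    ([], [])
  ((PySem.Dict.ofList st.2).items, (PySem.Dict.ofList st.1).items)

-- ===== PRECONDITION & SPEC =====
-- A Python dict cannot hold two entries with the same key; an association list with a repeated
-- key encodes no dict input, so such lists are excluded (both ports collapse duplicates, but in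
-- different, equally accidental ways).
def Pre_userDictParser (user_dict : List (String × String)) : Prop :=
  (user_dict.map Prod.fst).Nodup
instance (user_dict : List (String × String)) : Decidable (Pre_userDictParser user_dict) := by
  unfold Pre_userDictParser; infer_instance
def pvWitness_userDictParser : (List (String × String)) :=
  [("ip1", "10.0.0.1"), ("apn2", "net"), ("name", "bob"), ("apn1", "web")]
def Spec_userDictParser (user_dict : List (String × String)) (out : (List (String × String)) × (List (String × String))) : Prop := out = userDictParser_alt user_dict
instance (user_dict : List (String × String)) (out : (List (String × String)) × (List (String × String))) : Decidable (Spec_userDictParser user_dict out) := by unfold Spec_userDictParser; infer_instance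

-- ===== CLAIM (what is proved, stated in full; the proofs are below) =====
def Claim_equal_userDictParser : Prop := ∀ (user_dict : List (String × String)), Dom_userDictParser user_dict → Pre_userDictParser user_dict → Spec_userDictParser user_dict (userDictParser user_dict)

-- ===== LEMMAS AND PROOFS =====

-- The shared loop shape: the two-way branching fold over a product state is the pair of folds
-- over the two filtered sublists.
theorem pvFoldBranch {σ τ : Type} (l : List (String × String))
    (g1 : σ → String × String → σ) (g2 : τ → String × String → τ) (s1 : σ) (s2 : τ) :
    l.foldl
      (fun (st : σ × τ) kv =>
        if PySem.Str.isIn "ip" kv.1 then (g1 st.1 kv, st.2)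
        else if PySem.Str.isIn "apn" kv.1 then (st.1, g2 st.2 kv)
        else st) (s1, s2)
    = ((l.filter (fun kv => PySem.Str.isIn "ip" kv.1)).foldl g1 s1,
       (l.filter (fun kv => !PySem.Str.isIn "ip" kv.1 && PySem.Str.isIn "apn" kv.1)).foldl g2 s2) := by
  induction l generalizing s1 s2 with
  | nil => rfl
  | cons kv t ih =>
    cases h1 : PySem.Str.isIn "ip" kv.1 <;> cases h2 : PySem.Str.isIn "apn" kv.1 <;>
      simp only [List.foldl_cons, List.filter_cons, h1, h2, Bool.not_true, Bool.not_false,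
        Bool.false_and, Bool.true_and, if_true, if_false, Bool.false_eq_true, ih]

-- A fresh-key insert-fold from empty, with value function f, produces exactly the f-image items.
theorem pvItemsFold (l : List (String × String)) (f : String × String → String)
    (hnd : (l.map Prod.fst).Nodup) :
    (l.foldl (fun (d : PySem.Dict String String) kv => d.insert kv.1 (f kv))
       PySem.Dict.empty).items = l.map (fun kv => (kv.1, f kv)) := by
  have := PySem.Dict.items_foldl_insert_fresh (l := l) (k := Prod.fst) (v := f)
    (d := PySem.Dict.empty) (by intro a _; simp [PySem.Dict.contains_empty]) hnd
  simpa using this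

-- OrderedDict of a list with distinct keys has exactly that items list.
theorem pvItemsOfList (l : List (String × String)) (hnd : (l.map Prod.fst).Nodup) :
    (PySem.Dict.ofList l).items = l := by
  have := PySem.Dict.items_foldl_insert_fresh (l := l) (k := Prod.fst) (v := Prod.snd)
    (d := PySem.Dict.empty) (by intro a _; simp [PySem.Dict.contains_empty]) hnd
  simpa [PySem.Dict.ofList, PySem.Dict.update] using this

-- With distinct keys, the dict lookup A performs returns the pair's own value.
theorem pvLookup (user_dict : List (String × String)) (hnd : (user_dict.map Prod.fst).Nodup)
    (kv : String × String) (hm : kv ∈ user_dict) :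
    (PySem.Dict.mk user_dict).getD kv.1 "" = kv.2 := by
  exact PySem.Dict.getD_of_mem_items (d := PySem.Dict.mk user_dict) (k := kv.1) (v := kv.2)
    (by simpa [PySem.Dict.items] using hm) (by simpa [PySem.Dict.keys] using hnd) ""

-- Sorted insertion inserts: the result is a permutation of item :: list.
theorem pvInsort_perm (x : String × String) (l : List (String × String)) :
    (pvInsort x l).Perm (x :: l) := by
  induction l with
  | nil => simp [pvInsort]
  | cons h t ih =>
    unfold pvInsort
    split_ifs with hc
    · exact (ih.cons h).trans (List.Perm.swap x h t)
    · exact List.Perm.refl _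

-- Sorted insertion of a fresh key preserves strict key-sortedness.
theorem pvInsort_pairwise (x : String × String) (l : List (String × String))
    (hp : l.Pairwise (fun a b => a.1 < b.1)) (hx : x.1 ∉ l.map Prod.fst) :
    (pvInsort x l).Pairwise (fun a b => a.1 < b.1) := by
  induction l with
  | nil => simp [pvInsort]
  | cons h t ih =>
    simp only [List.map_cons, List.mem_cons, not_or] at hx
    obtain ⟨hxh, hxt⟩ := hx
    rw [List.pairwise_cons] at hp
    obtain ⟨hht, hpt⟩ := hp
    unfold pvInsort
    split_ifs with hc
    · rw [List.pairwise_cons]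
      constructor
      · intro b hb
        rcases List.mem_cons.mp ((pvInsort_perm x t).mem_iff.mp hb) with hbx | hbt
        · subst hbx
          rcases hc with h1 | ⟨h1, _⟩
          · exact h1
          · exact absurd h1.symm hxh
        · exact hht b hbt
      · exact ih hpt hxt
    · have hxlt : x.1 < h.1 := by
        rcases lt_trichotomy x.1 h.1 with h1 | h1 | h1
        · exact h1
        · exact absurd h1 hxh
        · exact absurd (Or.inl h1) hc
      rw [List.pairwise_cons]
      refine ⟨?_, List.pairwise_cons.mpr ⟨hht, hpt⟩⟩
      intro b hb
      rcases List.mem_cons.mp hb with hbh | hbt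
      · subst hbh; exact hxlt
      · exact hxlt.trans (hht b hbt)

-- The insertion-sort fold: from a sorted accumulator with keys fresh for the rest of the list,
-- it yields a strictly key-sorted permutation of accumulator ++ list.
theorem pvInsortFold (l : List (String × String)) :
    ∀ (acc : List (String × String)),
      (((acc ++ l).map Prod.fst).Nodup) →
      acc.Pairwise (fun a b => a.1 < b.1) →
      (l.foldl (fun s kv => pvInsort kv s) acc).Perm (acc ++ l) ∧
      (l.foldl (fun s kv => pvInsort kv s) acc).Pairwise (fun a b => a.1 < b.1) := by
  induction l with
  | nil => intro acc _ hp; simpa using hp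
  | cons kv t ih =>
    intro acc hnd hp
    have hperm1 : (pvInsort kv acc).Perm (kv :: acc) := pvInsort_perm kv acc
    have hmid : (acc ++ kv :: t).Perm (kv :: (acc ++ t)) := List.perm_middle
    have hperm2 : ((pvInsort kv acc) ++ t).Perm (acc ++ kv :: t) :=
      ((hperm1.append_right t).trans (List.perm_middle.symm))
    have hnd' : (((pvInsort kv acc) ++ t).map Prod.fst).Nodup :=
      ((hperm2.map Prod.fst).nodup_iff).mpr hnd
    have hkvfresh : kv.1 ∉ acc.map Prod.fst := by
      have : ((acc ++ kv :: t).map Prod.fst).Nodup := hnd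
      have h2 : ((kv :: (acc ++ t)).map Prod.fst).Nodup :=
        ((hmid.map Prod.fst).nodup_iff).mp this
      simp only [List.map_cons, List.nodup_cons, List.map_append, List.mem_append] at h2
      exact fun hmem => h2.1 (Or.inl hmem)
    have hp' : (pvInsort kv acc).Pairwise (fun a b => a.1 < b.1) :=
      pvInsort_pairwise kv acc hp hkvfresh
    obtain ⟨hP, hS⟩ := ih (pvInsort kv acc) hnd' hp'
    exact ⟨by simpa using hP.trans hperm2, by simpa using hS⟩

-- Sorting commutes with the insertion-sort fold: under distinct keys the fold from [] over a
-- list equals PySem's sorted of that list.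
theorem pvInsortFold_eq_sorted (l : List (String × String))
    (hnd : (l.map Prod.fst).Nodup) :
    PySem.List.sorted l (fun p => p.1) false = l.foldl (fun s kv => pvInsort kv s) [] := by
  obtain ⟨hP, hS⟩ := pvInsortFold l [] (by simpa using hnd) (by simp)
  exact PySem.List.sorted_eq_of_perm_of_pairwise_lt l _ _ (by simpa using hP) hS

-- ===== VERDICT (by name: the statement is the Claim_ definition above) =====
theorem userDictParser_spec : Claim_equal_userDictParser := by
  intro user_dict _ hnd
  unfold Spec_userDictParser userDictParser userDictParser_alt
  rw [pvFoldBranch (g1 := fun (d : PySem.Dict String String) kv =>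
        d.insert kv.1 ((PySem.Dict.mk user_dict).getD kv.1 ""))
      (g2 := fun (d : PySem.Dict String String) kv =>
        d.insert kv.1 ((PySem.Dict.mk user_dict).getD kv.1 "")),
      pvFoldBranch (g1 := fun s kv => pvInsort kv s) (g2 := fun s kv => pvInsort kv s)]
  have hsub : ∀ (p : String × String → Bool) (l : List (String × String)),
      (l.map Prod.fst).Nodup → ((l.filter p).map Prod.fst).Nodup := by
    intro p l h
    exact h.sublist (List.filter_sublist.map Prod.fst)
  -- A side: the lookup-valued items are just the filtered pairs
  have hA : ∀ (p : String × String → Bool),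
      ((user_dict.filter p).foldl
        (fun (d : PySem.Dict String String) kv =>
          d.insert kv.1 ((PySem.Dict.mk user_dict).getD kv.1 "")) PySem.Dict.empty).items
      = user_dict.filter p := by
    intro p
    rw [pvItemsFold _ _ (hsub p _ hnd)]
    have : ∀ kv ∈ user_dict.filter p,
        (kv.1, (PySem.Dict.mk user_dict).getD kv.1 "") = kv := by
      intro kv hm
      rw [pvLookup user_dict hnd kv (List.mem_of_mem_filter hm)]
    simpa using List.map_congr_left this
  -- B side: Dict.ofList keeps the insertion-sorted list, which is sorted(filter)
  have hB : ∀ (p : String × String → Bool),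
      (PySem.Dict.ofList ((user_dict.filter p).foldl (fun s kv => pvInsort kv s) [])).items
      = PySem.List.sorted (user_dict.filter p) (fun q => q.1) false := by
    intro p
    have hndf := hsub p _ hnd
    rw [← pvInsortFold_eq_sorted _ hndf]
    apply pvItemsOfList
    have hP : (PySem.List.sorted (user_dict.filter p) (fun q => q.1) false).Perm
        (user_dict.filter p) := PySem.List.sorted_perm _ _ _
    exact ((hP.map Prod.fst).nodup_iff).mpr hndf
  simp only [hA, hB]
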